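-- pv_equiv track=rewrite | github.com/piyush4793/codechef-piyush | april-2020/covid_queue.py | solve
-- ===== SOURCE A (Python) =====
-- def solve(arr, n):
--     prev_one = -1
--     for i in range(n):
--         if prev_one == -1 and arr[i] == 1:
--             prev_one = i
--         elif arr[i] == 1:
--             diff = i - prev_one
--             prev_one = i
--             if diff < 6:
--                 return 'NO'
--
--     return 'YES'
-- ===== SOURCE B (Python) =====
-- def solve(arr, n):
--     for i in range(n):
--         if arr[i] == 1:
--             for j in range(i + 1, min(i + 6, n)):
--                 if arr[j] == 1:
--                     return 'NO'
--     return 'YES'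
-- ===== Notes on version B (the rewrite author's own statement) =====
-- stated objective: alternative
-- what changed: Replaces A's stateful scan comparing each 1 against the previously seen 1-position by a stateless windowed check: for every 1 at index i, look ahead at the next five cells (clipped to n) for another 1; correct because two 1s less than 6 apart exist iff some 1 has another 1 in its 5-cell look-ahead window.
import Mathlib
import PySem

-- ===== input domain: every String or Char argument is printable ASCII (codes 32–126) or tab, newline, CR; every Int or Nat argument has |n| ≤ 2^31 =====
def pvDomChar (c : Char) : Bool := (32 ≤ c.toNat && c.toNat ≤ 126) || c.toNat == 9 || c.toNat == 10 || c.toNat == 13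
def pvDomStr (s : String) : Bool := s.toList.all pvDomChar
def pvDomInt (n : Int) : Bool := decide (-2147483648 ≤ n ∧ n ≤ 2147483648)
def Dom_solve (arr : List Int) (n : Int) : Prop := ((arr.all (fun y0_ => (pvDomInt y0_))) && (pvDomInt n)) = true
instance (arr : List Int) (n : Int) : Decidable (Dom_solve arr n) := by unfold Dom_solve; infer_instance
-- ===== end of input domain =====

-- B replaces A's stateful previous-1-position scan by a stateless look-ahead:
-- every 1 checks a 5-cell window after itself for another 1 (objective: alternative).

-- ===== PORT A =====
-- A's loop over range(n) with state prev_one; arr[i] is in range where Python A returns, so pyGetD is exact there.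
def solveLoopA (arr : List Int) : List Int → Int → String
  | [], _ => "YES"
  | i :: rest, prev =>
    if prev = -1 ∧ PySem.List.pyGetD arr i 0 = 1 then
      solveLoopA arr rest i
    else if PySem.List.pyGetD arr i 0 = 1 then
      let diff := i - prev
      if diff < 6 then "NO" else solveLoopA arr rest i
    else
      solveLoopA arr rest prev

def solve (arr : List Int) (n : Int) : String :=
  solveLoopA arr (PySem.List.pyRange 0 n 1) (-1)

-- ===== PORT B =====
-- for i in range(n): if arr[i]==1: for j in range(i+1, min(i+6, n)): if arr[j]==1: return 'NO'
-- (the inner early-returning scan is List.any over its range)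
def solveLoopB (arr : List Int) (n : Int) : List Int → String
  | [] => "YES"
  | i :: rest =>
    if PySem.List.pyGetD arr i 0 = 1 then
      if (PySem.List.pyRange (i + 1) (min (i + 6) n) 1).any
          (fun j => PySem.List.pyGetD arr j 0 = 1) then "NO"
      else solveLoopB arr n rest
    else solveLoopB arr n rest

def solve_alt (arr : List Int) (n : Int) : String :=
  solveLoopB arr n (PySem.List.pyRange 0 n 1)

-- ===== PRECONDITION & SPEC =====
-- Pre_ excludes exactly the inputs where Python A raises IndexError: n > len(arr) while arr
-- contains no two 1s less than 6 apart (then the scan runs off the end of arr).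
def Pre_solve (arr : List Int) (n : Int) : Prop :=
  n ≤ (arr.length : Int) ∨
  ∃ a ∈ List.range arr.length, ∃ b ∈ List.range arr.length,
    a < b ∧ b - a < 6 ∧ arr.getD a 0 = 1 ∧ arr.getD b 0 = 1
instance (arr : List Int) (n : Int) : Decidable (Pre_solve arr n) := by unfold Pre_solve; infer_instance
def pvWitness_solve : List Int × Int := ([1, 0, 0, 0, 0, 0, 1], 7)

def Spec_solve (arr : List Int) (n : Int) (out : String) : Prop := out = solve_alt arr n
instance (arr : List Int) (n : Int) (out : String) : Decidable (Spec_solve arr n out) := by unfold Spec_solve; infer_instance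

-- ===== CLAIM (what is proved, stated in full; the proofs are below) =====
def Claim_equal_solve : Prop := ∀ (arr : List Int) (n : Int), Dom_solve arr n → Pre_solve arr n → Spec_solve arr n (solve arr n)

-- ===== LEMMAS AND PROOFS =====

-- Proof-side helper: A's post-first-1 loop as a pure pair check over the 1-positions.
def checkPairsB : List (Int × Int) → String
  | [] => "YES"
  | (a, b) :: rest => if b - a < 6 then "NO" else checkPairsB rest

-- Proof-side helper: "some adjacent pair is < 6 apart".
def adjBad : List Int → Bool
  | a :: b :: rest => decide (b - a < 6) || adjBad (b :: rest)
  | _ => false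

-- After the first 1 is found (prev ≠ -1), A's loop checks exactly the consecutive gaps
-- of prev followed by the remaining 1-positions.
theorem solveLoopA_run (arr : List Int) (idxs : List Int) (prev : Int)
    (hidx : ∀ i ∈ idxs, i ≠ -1) (hprev : prev ≠ -1) :
    solveLoopA arr idxs prev =
      checkPairsB ((prev :: idxs.filter (fun i => PySem.List.pyGetD arr i 0 = 1)).zip
                   (idxs.filter (fun i => PySem.List.pyGetD arr i 0 = 1))) := by
  induction idxs generalizing prev with
  | nil => simp [solveLoopA, checkPairsB]
  | cons i rest ih =>
    have hi : i ≠ -1 := hidx i (List.mem_cons_self ..)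
    have hrest : ∀ j ∈ rest, j ≠ -1 := fun j hj => hidx j (List.mem_cons_of_mem _ hj)
    by_cases h1 : PySem.List.pyGetD arr i 0 = 1
    · simp only [solveLoopA, hprev, false_and, if_false, h1, if_true,
        List.filter_cons, decide_eq_true_eq, List.zip_cons_cons, checkPairsB]
      by_cases hd : i - prev < 6
      · simp [hd]
      · simp only [hd, if_false]
        exact ih i hrest hi
    · simp only [solveLoopA, h1, and_false, if_false, List.filter_cons, decide_eq_true_eq]
      exact ih prev hrest hprev

-- The search phase (prev = -1): A skips 0s until the first 1, which becomes prev.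
theorem solveLoopA_search (arr : List Int) (idxs : List Int)
    (hidx : ∀ i ∈ idxs, i ≠ -1) :
    solveLoopA arr idxs (-1) =
      checkPairsB ((idxs.filter (fun i => PySem.List.pyGetD arr i 0 = 1)).zip
                   ((idxs.filter (fun i => PySem.List.pyGetD arr i 0 = 1)).drop 1)) := by
  induction idxs with
  | nil => simp [solveLoopA, checkPairsB]
  | cons i rest ih =>
    have hi : i ≠ -1 := hidx i (List.mem_cons_self ..)
    have hrest : ∀ j ∈ rest, j ≠ -1 := fun j hj => hidx j (List.mem_cons_of_mem _ hj)
    by_cases h1 : PySem.List.pyGetD arr i 0 = 1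
    · simp only [solveLoopA, h1, and_true, List.filter_cons, decide_eq_true_eq,
        List.drop_one]
      exact solveLoopA_run arr rest i hrest hi
    · simp only [solveLoopA, h1, and_false, if_false, List.filter_cons, decide_eq_true_eq]
      exact ih hrest

theorem checkPairsB_eq_adjBad (l : List Int) :
    checkPairsB (l.zip (l.drop 1)) = if adjBad l then "NO" else "YES" := by
  induction l with
  | nil => simp [checkPairsB, adjBad]
  | cons a tl ih =>
    cases tl with
    | nil => simp [checkPairsB, adjBad]
    | cons b rest =>
      simp only [List.drop_one, List.tail_cons, List.zip_cons_cons, checkPairsB, adjBad]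
      by_cases hd : b - a < 6
      · simp [hd]
      · simpa [hd] using ih

-- On a strictly increasing list, "some adjacent gap < 6" equals "some pair < 6 apart":
-- the successor of an element is its nearest later element.
theorem adjBad_true_iff (l : List Int) (h : l.Pairwise (· < ·)) :
    adjBad l = true ↔ ∃ a ∈ l, ∃ b ∈ l, a < b ∧ b - a < 6 := by
  induction l with
  | nil => simp [adjBad]
  | cons a tl ih =>
    cases tl with
    | nil => simp [adjBad]
    | cons b rest =>
      have hab : a < b := (List.pairwise_cons.mp h).1 b (List.mem_cons_self ..)
      have ha_lt : ∀ x ∈ b :: rest, a < x := (List.pairwise_cons.mp h).1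
      have htl : (b :: rest).Pairwise (· < ·) := (List.pairwise_cons.mp h).2
      have hb_lt : ∀ x ∈ rest, b < x := (List.pairwise_cons.mp htl).1
      simp only [adjBad, Bool.or_eq_true, decide_eq_true_eq, ih htl]
      constructor
      · rintro (hd | ⟨x, hx, y, hy, hxy, hgap⟩)
        · exact ⟨a, List.mem_cons_self .., b, List.mem_cons_of_mem _ (List.mem_cons_self ..), hab, hd⟩
        · exact ⟨x, List.mem_cons_of_mem _ hx, y, List.mem_cons_of_mem _ hy, hxy, hgap⟩
      · rintro ⟨x, hx, y, hy, hxy, hgap⟩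
        rcases List.mem_cons.mp hx with rfl | hx'
        · -- x = a; then y ∈ b :: rest and b ≤ y, so the adjacent gap b - a is small too
          left
          have hy' : y ∈ b :: rest := by
            rcases List.mem_cons.mp hy with rfl | h' 
            · omega
            · exact h'
          have : b ≤ y := by
            rcases List.mem_cons.mp hy' with rfl | h'
            · omega
            · exact le_of_lt (hb_lt y h')
          omega
        · right
          have hy' : y ∈ b :: rest := by
            rcases List.mem_cons.mp hy with rfl | h'
            · exact absurd (ha_lt x hx') (by omega)
            · exact h'
          exact ⟨x, hx', y, hy', hxy, hgap⟩

-- B's outer loop is a pure any-scan (it keeps no state).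
theorem solveLoopB_char (arr : List Int) (n : Int) (idxs : List Int) :
    solveLoopB arr n idxs =
      if idxs.any (fun i => decide (PySem.List.pyGetD arr i 0 = 1) &&
          (PySem.List.pyRange (i + 1) (min (i + 6) n) 1).any
            (fun j => PySem.List.pyGetD arr j 0 = 1)) then "NO" else "YES" := by
  induction idxs with
  | nil => simp [solveLoopB]
  | cons i rest ih =>
    by_cases h1 : PySem.List.pyGetD arr i 0 = 1
    · by_cases hw : (PySem.List.pyRange (i + 1) (min (i + 6) n) 1).any
          (fun j => PySem.List.pyGetD arr j 0 = 1) = true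
      · simp [solveLoopB, h1, hw]
      · simp only [solveLoopB, h1, if_true, hw, List.any_cons]
        simpa [h1, hw] using ih
    · simp only [solveLoopB, h1, if_false, List.any_cons]
      simpa [h1] using ih

-- The windowed any-scan finds a hit iff two 1-positions lie < 6 apart.
theorem window_iff (f : Int → Bool) (n : Int) :
    ((PySem.List.pyRange 0 n 1).any
        (fun i => f i && (PySem.List.pyRange (i + 1) (min (i + 6) n) 1).any f)) = true ↔
      ∃ a ∈ (PySem.List.pyRange 0 n 1).filter f,
        ∃ b ∈ (PySem.List.pyRange 0 n 1).filter f, a < b ∧ b - a < 6 := by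
  simp only [List.any_eq_true, List.mem_filter, Bool.and_eq_true, PySem.List.mem_pyRange_one]
  constructor
  · rintro ⟨i, ⟨hi0, hin⟩, hfi, j, ⟨hj1, hj2⟩, hfj⟩
    exact ⟨i, ⟨⟨hi0, hin⟩, hfi⟩, j, ⟨⟨by omega, by omega⟩, hfj⟩, by omega, by omega⟩
  · rintro ⟨a, ⟨⟨ha0, han⟩, hfa⟩, b, ⟨⟨hb0, hbn⟩, hfb⟩, hab, hgap⟩
    exact ⟨a, ⟨ha0, han⟩, hfa, b, ⟨by omega, by omega⟩, hfb⟩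

-- ===== VERDICT (by name: the statement is the Claim_ definition above) =====
theorem solve_spec : Claim_equal_solve := by
  intro arr n _ _
  unfold Spec_solve solve solve_alt
  have hne : ∀ i ∈ PySem.List.pyRange 0 n 1, i ≠ -1 := fun i hi => by
    have := (PySem.List.mem_pyRange_one).mp hi
    omega
  rw [solveLoopA_search arr _ hne, checkPairsB_eq_adjBad, solveLoopB_char]
  have hpw : ((PySem.List.pyRange 0 n 1).filter
      (fun i => PySem.List.pyGetD arr i 0 = 1)).Pairwise (· < ·) :=
    (PySem.List.pairwise_lt_pyRange_one 0 n).sublist List.filter_sublist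
  have hiff := (adjBad_true_iff _ hpw).trans
    (window_iff (fun i => decide (PySem.List.pyGetD arr i 0 = 1)) n).symm
  by_cases h : adjBad ((PySem.List.pyRange 0 n 1).filter
      (fun i => PySem.List.pyGetD arr i 0 = 1)) = true
  · rw [h, hiff.mp h]
  · rw [Bool.not_eq_true] at h
    rw [h]
    have h2 := (not_iff_not.mpr hiff).mp (by simp [h])
    rw [Bool.not_eq_true] at h2
    rw [h2]
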